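-- pv_equiv track=rewrite | github.com/EdwinOrtegaK/Puzzle-Heinz | src/main.py | obtener_pasos_desde
-- ===== SOURCE A (Python) =====
-- def obtener_pasos_desde(origen_inicial, grafo, relacion_info, faltantes_estado):
--     pasos = []
--     visitados = set()
--
--     def dfs(actual):
--         visitados.add(actual)
--         for vecino in grafo[actual]:
--             if vecino not in visitados:
--                 origen_con, destino_con = relacion_info[(actual, vecino)]
--
--                 origen_str = f"Pieza {actual} ({origen_con})"
--                 destino_str = f"Pieza {vecino} ({destino_con})"
--
--                 if faltantes_estado.get(actual, False):
--                     origen_str += " FALTANTE"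
--                 if faltantes_estado.get(vecino, False):
--                     destino_str += " FALTANTE"
--
--                 pasos.append(f"{origen_str} → {destino_str}")
--                 dfs(vecino)
--
--     dfs(origen_inicial)
--     return pasos
-- ===== SOURCE B (Python) =====
-- def obtener_pasos_desde(origen_inicial, grafo, relacion_info, faltantes_estado):
--     # Iterative pre-order DFS with an explicit stack of (node, pending-neighbors) frames;
--     # each frame resumes where it left off, so the emission order matches the recursive DFS.
--     pasos = []
--     visitados = {origen_inicial}
--     pila = [(origen_inicial, list(grafo[origen_inicial]))]
--     while pila:
--         actual, pendientes = pila[-1]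
--         if not pendientes:
--             pila.pop()
--             continue
--         vecino = pendientes.pop(0)
--         if vecino in visitados:
--             continue
--         origen_con, destino_con = relacion_info[(actual, vecino)]
--         origen_str = f"Pieza {actual} ({origen_con})"
--         destino_str = f"Pieza {vecino} ({destino_con})"
--         if faltantes_estado.get(actual, False):
--             origen_str += " FALTANTE"
--         if faltantes_estado.get(vecino, False):
--             destino_str += " FALTANTE"
--         pasos.append(f"{origen_str} → {destino_str}")
--         visitados.add(vecino)
--         pila.append((vecino, list(grafo[vecino])))
--     return pasos
-- ===== Notes on version B (the rewrite author's own statement) =====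
-- stated objective: alternative
-- what changed: The recursive DFS (nested function mutating closure state) is replaced by an iterative loop over an explicit stack of (node, pending-neighbors) frames that resume where they left off, preserving the exact pre-order emission without recursion.
import Mathlib
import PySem

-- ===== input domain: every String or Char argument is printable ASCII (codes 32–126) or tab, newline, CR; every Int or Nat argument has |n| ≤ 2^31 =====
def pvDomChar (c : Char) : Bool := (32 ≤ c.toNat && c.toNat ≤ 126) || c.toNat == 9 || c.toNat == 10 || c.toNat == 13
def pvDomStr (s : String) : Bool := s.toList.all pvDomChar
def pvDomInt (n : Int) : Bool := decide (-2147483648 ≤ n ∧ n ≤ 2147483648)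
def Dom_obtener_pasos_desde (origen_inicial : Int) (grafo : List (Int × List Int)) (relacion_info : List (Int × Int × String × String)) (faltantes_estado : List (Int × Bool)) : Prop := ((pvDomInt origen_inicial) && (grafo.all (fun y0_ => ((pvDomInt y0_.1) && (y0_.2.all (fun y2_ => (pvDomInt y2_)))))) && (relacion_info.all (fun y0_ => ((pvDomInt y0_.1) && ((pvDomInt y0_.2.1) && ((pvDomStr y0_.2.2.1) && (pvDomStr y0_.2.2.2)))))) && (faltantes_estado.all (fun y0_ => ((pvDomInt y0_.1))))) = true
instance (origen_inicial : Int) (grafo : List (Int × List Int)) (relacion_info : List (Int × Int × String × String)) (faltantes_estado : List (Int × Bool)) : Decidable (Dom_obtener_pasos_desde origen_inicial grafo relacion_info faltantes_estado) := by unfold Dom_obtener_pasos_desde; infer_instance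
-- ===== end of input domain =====

-- B replaces A's recursive DFS (a nested function mutating closure state) by an iterative
-- explicit-stack DFS whose frames resume where they left off; same pre-order step list.

-- ===== PORT A =====
-- Python-dict lookups: first-match association-list lookup.  Where A's Python raises
-- KeyError (grafo[u] with u not a key, relacion_info[(u,v)] with no entry) the lookup is
-- totalized with a dummy default; Pre_ below excludes exactly those raising inputs.
def pvGetNbrs (grafo : List (Int × List Int)) (u : Int) : List Int :=
  ((grafo.find? (fun p => p.1 == u)).map (fun p => p.2)).getD []

def pvGetRel (relacion_info : List (Int × Int × String × String)) (u v : Int) : String × String :=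
  ((relacion_info.find? (fun p => p.1 == u && p.2.1 == v)).map (fun p => (p.2.2.1, p.2.2.2))).getD ("", "")

def pvGetFalt (faltantes_estado : List (Int × Bool)) (u : Int) : Bool :=
  ((faltantes_estado.find? (fun p => p.1 == u)).map (fun p => p.2)).getD false

-- the step string "Pieza u (oc)[ FALTANTE] → Pieza v (dc)[ FALTANTE]" both Pythons build
def pvStep (relacion_info : List (Int × Int × String × String)) (faltantes_estado : List (Int × Bool)) (actual vecino : Int) : String :=
  let oc := (pvGetRel relacion_info actual vecino).1
  let dc := (pvGetRel relacion_info actual vecino).2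
  let os0 := "Pieza " ++ PySem.Int.toStr actual ++ " (" ++ oc ++ ")"
  let ds0 := "Pieza " ++ PySem.Int.toStr vecino ++ " (" ++ dc ++ ")"
  let os := if pvGetFalt faltantes_estado actual then os0 ++ " FALTANTE" else os0
  let ds := if pvGetFalt faltantes_estado vecino then ds0 ++ " FALTANTE" else ds0
  os ++ " → " ++ ds

-- totality fuel for the recursion: every dfs call adds a fresh node to visitados, and all
-- visited nodes come from origen plus grafo's neighbor lists, so the depth never exceeds it
def pvFuelA (grafo : List (Int × List Int)) : Nat := (grafo.flatMap (fun p => p.2)).length + 2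

-- A's nested 'dfs': state = (visitados, pasos)
def pasosDfsA (grafo : List (Int × List Int)) (relacion_info : List (Int × Int × String × String)) (faltantes_estado : List (Int × Bool)) : Nat → Int → (PySem.Set Int × List String) → (PySem.Set Int × List String)
  | 0, _, st => st
  | f+1, actual, st =>
      (pvGetNbrs grafo actual).foldl
        (fun st vecino =>
          if PySem.Set.contains st.1 vecino then st
          else pasosDfsA grafo relacion_info faltantes_estado f vecino
                 (st.1, st.2 ++ [pvStep relacion_info faltantes_estado actual vecino]))
        (PySem.Set.add st.1 actual, st.2)

def obtener_pasos_desde (origen_inicial : Int) (grafo : List (Int × List Int)) (relacion_info : List (Int × Int × String × String)) (faltantes_estado : List (Int × Bool)) : List String :=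
  (pasosDfsA grafo relacion_info faltantes_estado (pvFuelA grafo) origen_inicial (PySem.Set.empty, [])).2

-- ===== PORT B =====
-- totality fuel for the loop: pops + skips + pushes are bounded by (edges + 2)²
def pvFuelB (grafo : List (Int × List Int)) : Nat :=
  ((grafo.flatMap (fun p => p.2)).length + 2) * ((grafo.flatMap (fun p => p.2)).length + 2)

-- B's while-loop: stack of (actual, pendientes) frames, top = head
def runPasosB (grafo : List (Int × List Int)) (relacion_info : List (Int × Int × String × String)) (faltantes_estado : List (Int × Bool)) : Nat → List (Int × List Int) → PySem.Set Int → List String → List String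
  | 0, _, _, pasos => pasos
  | _+1, [], _, pasos => pasos
  | f+1, (actual, pendientes) :: resto, visitados, pasos =>
      match pendientes with
      | [] => runPasosB grafo relacion_info faltantes_estado f resto visitados pasos
      | vecino :: pendientes' =>
          if PySem.Set.contains visitados vecino then
            runPasosB grafo relacion_info faltantes_estado f ((actual, pendientes') :: resto) visitados pasos
          else
            runPasosB grafo relacion_info faltantes_estado f
              ((vecino, pvGetNbrs grafo vecino) :: (actual, pendientes') :: resto)
              (PySem.Set.add visitados vecino)
              (pasos ++ [pvStep relacion_info faltantes_estado actual vecino])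

def obtener_pasos_desde_alt (origen_inicial : Int) (grafo : List (Int × List Int)) (relacion_info : List (Int × Int × String × String)) (faltantes_estado : List (Int × Bool)) : List String :=
  runPasosB grafo relacion_info faltantes_estado (pvFuelB grafo)
    [(origen_inicial, pvGetNbrs grafo origen_inicial)]
    (PySem.Set.ofList [origen_inicial]) []

-- ===== PRECONDITION & SPEC =====
def pvKeyMem (grafo : List (Int × List Int)) (u : Int) : Bool := grafo.any (fun p => p.1 == u)
def pvRelMem (relacion_info : List (Int × Int × String × String)) (u v : Int) : Bool :=
  relacion_info.any (fun p => p.1 == u && p.2.1 == v)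
-- nodes reachable from o (closure; grafo.length+1 rounds reach a fixpoint)
def pvReach (grafo : List (Int × List Int)) (o : Int) : PySem.Set Int :=
  Nat.iterate (fun R => R.foldl (fun acc u => PySem.Set.update acc (pvGetNbrs grafo u)) R)
    (grafo.length + 1) (PySem.Set.add PySem.Set.empty o)

-- Pre_ is the closed-form no-KeyError condition: the start node is a grafo key, and every edge
-- out of a reachable node either returns to that edge's own source or to the start node (both
-- certainly already visited when examined) or has its target among grafo's keys and the edge in
-- relacion_info.  It over-approximates: an edge to a node the DFS happens to have visited earlier
-- (other than source/start) also never touches relacion_info, so A returns on a few inputs Pre_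
-- excludes (cited in claim.json).
def Pre_obtener_pasos_desde (origen_inicial : Int) (grafo : List (Int × List Int)) (relacion_info : List (Int × Int × String × String)) (faltantes_estado : List (Int × Bool)) : Prop :=
  (pvKeyMem grafo origen_inicial &&
    (pvReach grafo origen_inicial).all (fun u =>
      (pvGetNbrs grafo u).all (fun v =>
        (v == u) || (v == origen_inicial) ||
        (pvKeyMem grafo v && pvRelMem relacion_info u v)))) = true

instance (origen_inicial : Int) (grafo : List (Int × List Int)) (relacion_info : List (Int × Int × String × String)) (faltantes_estado : List (Int × Bool)) : Decidable (Pre_obtener_pasos_desde origen_inicial grafo relacion_info faltantes_estado) := by unfold Pre_obtener_pasos_desde; infer_instance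

def pvWitness_obtener_pasos_desde : Int × (List (Int × List Int)) × (List (Int × Int × String × String)) × (List (Int × Bool)) :=
  (0, [(0, [1]), (1, [0])], [(0, 1, "hueco A", "saliente B")], [(1, true)])

def Spec_obtener_pasos_desde (origen_inicial : Int) (grafo : List (Int × List Int)) (relacion_info : List (Int × Int × String × String)) (faltantes_estado : List (Int × Bool)) (out : List String) : Prop := out = obtener_pasos_desde_alt origen_inicial grafo relacion_info faltantes_estado
instance (origen_inicial : Int) (grafo : List (Int × List Int)) (relacion_info : List (Int × Int × String × String)) (faltantes_estado : List (Int × Bool)) (out : List String) : Decidable (Spec_obtener_pasos_desde origen_inicial grafo relacion_info faltantes_estado out) := by unfold Spec_obtener_pasos_desde; infer_instance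

-- ===== CLAIM (what is proved, stated in full; the proofs are below) =====
def Claim_equal_obtener_pasos_desde : Prop := ∀ (origen_inicial : Int) (grafo : List (Int × List Int)) (relacion_info : List (Int × Int × String × String)) (faltantes_estado : List (Int × Bool)), Dom_obtener_pasos_desde origen_inicial grafo relacion_info faltantes_estado → Pre_obtener_pasos_desde origen_inicial grafo relacion_info faltantes_estado → Spec_obtener_pasos_desde origen_inicial grafo relacion_info faltantes_estado (obtener_pasos_desde origen_inicial grafo relacion_info faltantes_estado)

-- ===== LEMMAS AND PROOFS =====

-- proof-side notions: the universe of visitable nodes, edge count, and fuel/cost measures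
def pvU (grafo : List (Int × List Int)) (o : Int) : List Int := o :: grafo.flatMap (fun p => p.2)
def pvE (grafo : List (Int × List Int)) : Nat := (grafo.flatMap (fun p => p.2)).length
def pvNeed (grafo : List (Int × List Int)) (o : Int) (vis : PySem.Set Int) : Nat :=
  (pvU grafo o).countP (fun x => !(PySem.Set.contains vis x))
def pvSC (stack : List (Int × List Int)) : Nat := (stack.map (fun fr => fr.2.length + 1)).sum
def pvCostB (grafo : List (Int × List Int)) (o : Int) (stack : List (Int × List Int)) (vis : PySem.Set Int) : Nat :=
  (pvE grafo + 2) * pvNeed grafo o vis + pvSC stack + 1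
-- the stack machine at its canonical sufficient fuel
def pvRunC (grafo : List (Int × List Int)) (relacion_info : List (Int × Int × String × String)) (faltantes_estado : List (Int × Bool)) (o : Int) (stack : List (Int × List Int)) (vis : PySem.Set Int) (pasos : List String) : List String :=
  runPasosB grafo relacion_info faltantes_estado (pvCostB grafo o stack vis) stack vis pasos
-- the body of A's neighbor loop at fixed fuel
def pvBodyA (grafo : List (Int × List Int)) (relacion_info : List (Int × Int × String × String)) (faltantes_estado : List (Int × Bool)) (f : Nat) (actual : Int) : (PySem.Set Int × List String) → Int → (PySem.Set Int × List String) :=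
  fun st vecino =>
    if PySem.Set.contains st.1 vecino then st
    else pasosDfsA grafo relacion_info faltantes_estado f vecino
           (st.1, st.2 ++ [pvStep relacion_info faltantes_estado actual vecino])
-- frames only ever hold neighbors of visited nodes, all inside pvU
def pvInv (grafo : List (Int × List Int)) (o : Int) (stack : List (Int × List Int)) : Prop :=
  ∀ fr ∈ stack, ∀ v ∈ fr.2, v ∈ pvU grafo o

lemma pvDfsA_succ (grafo : List (Int × List Int)) (rel : List (Int × Int × String × String)) (falt : List (Int × Bool)) (f : Nat) (u : Int) (st : PySem.Set Int × List String) :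
    pasosDfsA grafo rel falt (f+1) u st =
      (pvGetNbrs grafo u).foldl (pvBodyA grafo rel falt f u) (PySem.Set.add st.1 u, st.2) := rfl

lemma pvMem_getNbrs_U (grafo : List (Int × List Int)) (o u v : Int) (h : v ∈ pvGetNbrs grafo u) : v ∈ pvU grafo o := by
  unfold pvGetNbrs at h
  cases hf : grafo.find? (fun p => p.1 == u) with
  | none => rw [hf] at h; simp at h
  | some p =>
    rw [hf] at h; simp at h
    exact List.mem_cons_of_mem _ (List.mem_flatMap.mpr ⟨p, List.mem_of_find?_eq_some hf, h⟩)

lemma pvLen_getNbrs_le (grafo : List (Int × List Int)) (u : Int) : (pvGetNbrs grafo u).length ≤ pvE grafo := by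
  unfold pvGetNbrs pvE
  cases hf : grafo.find? (fun p => p.1 == u) with
  | none => simp
  | some p =>
    simp only [Option.map_some, Option.getD_some]
    have hmem : p.2.length ∈ grafo.map (fun q => q.2.length) :=
      List.mem_map_of_mem (List.mem_of_find?_eq_some hf)
    have := List.single_le_sum (l := grafo.map (fun q => q.2.length)) (by simp) _ hmem
    simpa [List.length_flatMap] using this

lemma pvNeed_le_of_sub (grafo : List (Int × List Int)) (o : Int) (vis vis' : PySem.Set Int)
    (h : ∀ x, x ∈ vis → x ∈ vis') : pvNeed grafo o vis' ≤ pvNeed grafo o vis := by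
  unfold pvNeed
  refine List.countP_mono_left (fun x _ hx => ?_)
  simp only [Bool.not_eq_eq_eq_not, Bool.not_true] at hx ⊢
  by_contra hc
  have : x ∈ vis := (PySem.Set.contains_iff vis x).mp (by
    cases hcv : PySem.Set.contains vis x with
    | true => rfl
    | false => exact absurd hcv hc)
  have : PySem.Set.contains vis' x = true := (PySem.Set.contains_iff vis' x).mpr (h x this)
  rw [this] at hx; cases hx

lemma pvCountP_lt_add (x : Int) (vis : PySem.Set Int) (hx : x ∉ vis) :
    ∀ (l : List Int), x ∈ l →
      (l.countP fun y => !(PySem.Set.contains (PySem.Set.add vis x) y)) <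
        l.countP (fun y => !(PySem.Set.contains vis y)) := by
  have hmono : ∀ (l : List Int),
      (l.countP fun y => !(PySem.Set.contains (PySem.Set.add vis x) y)) ≤
        l.countP (fun y => !(PySem.Set.contains vis y)) := by
    intro l
    refine List.countP_mono_left (fun y _ hy => ?_)
    simp only [Bool.not_eq_eq_eq_not, Bool.not_true] at hy ⊢
    cases hcv : PySem.Set.contains vis y with
    | false => rfl
    | true =>
      have : y ∈ PySem.Set.add vis x :=
        (PySem.Set.mem_add vis x y).mpr (Or.inl ((PySem.Set.contains_iff vis y).mp hcv))
      rw [(PySem.Set.contains_iff _ y).mpr this] at hy; cases hy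
  intro l
  induction l with
  | nil => intro h; cases h
  | cons a t ih =>
    intro hU
    rw [List.countP_cons, List.countP_cons]
    by_cases hax : a = x
    · subst hax
      have h1 : PySem.Set.contains (PySem.Set.add vis a) a = true :=
        (PySem.Set.contains_iff _ a).mpr ((PySem.Set.mem_add vis a a).mpr (Or.inr rfl))
      have h2 : PySem.Set.contains vis a = false := by
        cases hcv : PySem.Set.contains vis a with
        | false => rfl
        | true => exact absurd ((PySem.Set.contains_iff vis a).mp hcv) hx
      have hm := hmono t
      rw [h1, h2]
      simp only [Bool.not_true, Bool.not_false] at hm ⊢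
      simp only [show (false = true) = False from by simp, if_true, if_false]
      omega
    · have hxt : x ∈ t := by
        cases hU with
        | head => exact absurd rfl hax
        | tail _ h => exact h
      have heq : PySem.Set.contains (PySem.Set.add vis x) a = PySem.Set.contains vis a := by
        cases hcv : PySem.Set.contains vis a with
        | true =>
          exact (PySem.Set.contains_iff _ a).mpr
            ((PySem.Set.mem_add vis x a).mpr (Or.inl ((PySem.Set.contains_iff vis a).mp hcv)))
        | false =>
          cases hca : PySem.Set.contains (PySem.Set.add vis x) a with
          | false => rfl
          | true =>
            rcases (PySem.Set.mem_add vis x a).mp ((PySem.Set.contains_iff _ a).mp hca) with hm | hm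
            · rw [(PySem.Set.contains_iff vis a).mpr hm] at hcv; cases hcv
            · exact absurd hm hax
      rw [heq]
      have := ih hxt
      omega

lemma pvNeed_lt_add (grafo : List (Int × List Int)) (o x : Int) (vis : PySem.Set Int)
    (hU : x ∈ pvU grafo o) (hx : x ∉ vis) :
    pvNeed grafo o (PySem.Set.add vis x) < pvNeed grafo o vis :=
  pvCountP_lt_add x vis hx (pvU grafo o) hU

lemma pvNeed_le_len (grafo : List (Int × List Int)) (o : Int) (vis : PySem.Set Int) :
    pvNeed grafo o vis ≤ pvE grafo + 1 := by
  have := List.countP_le_length (l := pvU grafo o) (p := fun x => !(PySem.Set.contains vis x))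
  simpa [pvNeed, pvU, pvE] using this

lemma pvNeed_pos (grafo : List (Int × List Int)) (o x : Int) (vis : PySem.Set Int)
    (hU : x ∈ pvU grafo o) (hx : x ∉ vis) : 1 ≤ pvNeed grafo o vis := by
  unfold pvNeed
  refine List.countP_pos_iff.mpr ⟨x, hU, ?_⟩
  cases hcv : PySem.Set.contains vis x with
  | false => rfl
  | true => exact absurd ((PySem.Set.contains_iff vis x).mp hcv) hx

-- visitados only grows
lemma pvDfsA_sub (grafo : List (Int × List Int)) (rel : List (Int × Int × String × String)) (falt : List (Int × Bool)) :
    ∀ (f : Nat) (u : Int) (st : PySem.Set Int × List String) (x : Int), x ∈ st.1 →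
      x ∈ (pasosDfsA grafo rel falt f u st).1 := by
  intro f
  induction f with
  | zero => intro u st x hx; exact hx
  | succ f ih =>
    intro u st x hx
    rw [pvDfsA_succ]
    have : x ∈ ((PySem.Set.add st.1 u, st.2) : PySem.Set Int × List String).1 :=
      (PySem.Set.mem_add st.1 u x).mpr (Or.inl hx)
    generalize hst : ((PySem.Set.add st.1 u, st.2) : PySem.Set Int × List String) = st0 at this
    clear hst hx
    induction (pvGetNbrs grafo u) generalizing st0 with
    | nil => exact this
    | cons a t iht =>
      rw [List.foldl_cons]
      apply iht
      unfold pvBodyA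
      split
      · exact this
      · exact ih a (st0.1, st0.2 ++ [pvStep rel falt u a]) x this

lemma pvFoldA_sub (grafo : List (Int × List Int)) (rel : List (Int × Int × String × String)) (falt : List (Int × Bool)) (f : Nat) (u : Int) (l : List Int) (st : PySem.Set Int × List String) (x : Int) (h : x ∈ st.1) :
    x ∈ (l.foldl (pvBodyA grafo rel falt f u) st).1 := by
  induction l generalizing st with
  | nil => exact h
  | cons a t iht =>
    rw [List.foldl_cons]
    apply iht
    unfold pvBodyA
    split
    · exact h
    · exact pvDfsA_sub grafo rel falt f a (st.1, st.2 ++ [pvStep rel falt u a]) x h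

lemma pvRunB_nil (grafo : List (Int × List Int)) (rel : List (Int × Int × String × String)) (falt : List (Int × Bool)) (c : Nat) (vis : PySem.Set Int) (ps : List String) :
    runPasosB grafo rel falt c [] vis ps = ps := by
  cases c <;> rfl

-- the machine's value does not depend on the fuel once the fuel is sufficient
lemma pvCostB_cons_nil (grafo : List (Int × List Int)) (o u : Int) (rest : List (Int × List Int)) (vis : PySem.Set Int) :
    pvCostB grafo o ((u, []) :: rest) vis = pvCostB grafo o rest vis + 1 := by
  simp [pvCostB, pvSC]; omega

lemma pvCostB_cons_cons (grafo : List (Int × List Int)) (o u v : Int) (ns : List Int) (rest : List (Int × List Int)) (vis : PySem.Set Int) :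
    pvCostB grafo o ((u, v :: ns) :: rest) vis = pvCostB grafo o ((u, ns) :: rest) vis + 1 := by
  simp [pvCostB, pvSC]; omega

lemma pvCostB_push_le (grafo : List (Int × List Int)) (o u v : Int) (ns : List Int) (rest : List (Int × List Int)) (vis : PySem.Set Int)
    (hU : v ∈ pvU grafo o) (hv : v ∉ vis) :
    pvCostB grafo o ((v, pvGetNbrs grafo v) :: (u, ns) :: rest) (PySem.Set.add vis v) + 1 ≤
      pvCostB grafo o ((u, v :: ns) :: rest) vis := by
  have hneed : pvNeed grafo o (PySem.Set.add vis v) + 1 ≤ pvNeed grafo o vis :=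
    Nat.succ_le_of_lt (pvNeed_lt_add grafo o v vis hU hv)
  have hmul := Nat.mul_le_mul_left (pvE grafo + 2) hneed
  have hexp : (pvE grafo + 2) * (pvNeed grafo o (PySem.Set.add vis v) + 1) =
      (pvE grafo + 2) * pvNeed grafo o (PySem.Set.add vis v) + pvE grafo + 2 := by ring
  have hlen := pvLen_getNbrs_le grafo v
  simp only [pvCostB, pvSC, List.map_cons, List.sum_cons, List.length_cons]
  omega

lemma pvInv_tail (grafo : List (Int × List Int)) (o : Int) (fr : Int × List Int) (rest : List (Int × List Int))
    (h : pvInv grafo o (fr :: rest)) : pvInv grafo o rest :=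
  fun fr' hfr' => h fr' (List.mem_cons_of_mem _ hfr')

lemma pvInv_shrink (grafo : List (Int × List Int)) (o u v : Int) (ns : List Int) (rest : List (Int × List Int))
    (h : pvInv grafo o ((u, v :: ns) :: rest)) : pvInv grafo o ((u, ns) :: rest) := by
  intro fr hfr
  rcases List.mem_cons.mp hfr with hfr | hfr
  · subst hfr; intro w hw; exact h (u, v :: ns) List.mem_cons_self w (List.mem_cons_of_mem _ hw)
  · exact h fr (List.mem_cons_of_mem _ hfr)

lemma pvInv_push (grafo : List (Int × List Int)) (o u v : Int) (ns : List Int) (rest : List (Int × List Int))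
    (h : pvInv grafo o ((u, v :: ns) :: rest)) :
    pvInv grafo o ((v, pvGetNbrs grafo v) :: (u, ns) :: rest) := by
  intro fr hfr
  rcases List.mem_cons.mp hfr with hfr | hfr
  · subst hfr; intro w hw; exact pvMem_getNbrs_U grafo o v w hw
  · exact pvInv_shrink grafo o u v ns rest h fr hfr

lemma pvRunB_suff (grafo : List (Int × List Int)) (rel : List (Int × Int × String × String)) (falt : List (Int × Bool)) (o : Int) :
    ∀ (f₁ f₂ : Nat) (stack : List (Int × List Int)) (vis : PySem.Set Int) (ps : List String),
      pvInv grafo o stack →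
      pvCostB grafo o stack vis ≤ f₁ → pvCostB grafo o stack vis ≤ f₂ →
      runPasosB grafo rel falt f₁ stack vis ps = runPasosB grafo rel falt f₂ stack vis ps := by
  intro f₁
  induction f₁ with
  | zero =>
    intro f₂ stack vis ps _ h1 _
    exfalso; unfold pvCostB at h1; omega
  | succ f₁ ih =>
    intro f₂ stack vis ps hInv h1 h2
    cases f₂ with
    | zero => exfalso; unfold pvCostB at h2; omega
    | succ f₂ =>
      cases stack with
      | nil => rw [pvRunB_nil, pvRunB_nil]
      | cons fr rest =>
        obtain ⟨u, ns⟩ := fr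
        cases ns with
        | nil =>
          show runPasosB grafo rel falt f₁ rest vis ps = runPasosB grafo rel falt f₂ rest vis ps
          have hc := pvCostB_cons_nil grafo o u rest vis
          exact ih f₂ rest vis ps (pvInv_tail grafo o _ rest hInv) (by omega) (by omega)
        | cons v ns' =>
          have hc := pvCostB_cons_cons grafo o u v ns' rest vis
          cases hcv : PySem.Set.contains vis v with
          | true =>
            simp only [runPasosB, hcv, if_true]
            exact ih f₂ ((u, ns') :: rest) vis ps (pvInv_shrink grafo o u v ns' rest hInv) (by omega) (by omega)
          | false =>
            simp only [runPasosB, hcv, Bool.false_eq_true, if_false]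
            have hv : v ∉ vis := fun hm => by
              rw [(PySem.Set.contains_iff vis v).mpr hm] at hcv; cases hcv
            have hU : v ∈ pvU grafo o := hInv (u, v :: ns') List.mem_cons_self v List.mem_cons_self
            have hp := pvCostB_push_le grafo o u v ns' rest vis hU hv
            exact ih f₂ _ _ _ (pvInv_push grafo o u v ns' rest hInv) (by omega) (by omega)

lemma pvRunC_eq (grafo : List (Int × List Int)) (rel : List (Int × Int × String × String)) (falt : List (Int × Bool)) (o : Int) (f : Nat) (stack : List (Int × List Int)) (vis : PySem.Set Int) (ps : List String)
    (hInv : pvInv grafo o stack) (hf : pvCostB grafo o stack vis ≤ f) :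
    runPasosB grafo rel falt f stack vis ps = pvRunC grafo rel falt o stack vis ps :=
  pvRunB_suff grafo rel falt o f _ stack vis ps hInv hf le_rfl

-- the key simulation: one frame of the stack machine performs exactly A's neighbor loop
lemma pvKey (grafo : List (Int × List Int)) (rel : List (Int × Int × String × String)) (falt : List (Int × Bool)) (o : Int) :
    ∀ (n f : Nat) (u : Int) (ns : List Int) (stack : List (Int × List Int)) (vis : PySem.Set Int) (ps : List String),
      (pvE grafo + 2) * pvNeed grafo o vis + pvSC ((u, ns) :: stack) ≤ n →
      (∀ v ∈ ns, v ∈ pvU grafo o) →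
      pvInv grafo o stack →
      pvNeed grafo o vis ≤ f →
      pvRunC grafo rel falt o ((u, ns) :: stack) vis ps =
        (fun st => pvRunC grafo rel falt o stack st.1 st.2)
          (ns.foldl (pvBodyA grafo rel falt f u) (vis, ps)) := by
  intro n
  induction n with
  | zero =>
    intro f u ns stack vis ps hm _ _ _
    exfalso
    simp only [pvSC, List.map_cons, List.sum_cons] at hm
    omega
  | succ n ih =>
    intro f u ns stack vis ps hm hns hInv hf
    cases ns with
    | nil =>
      simp only [List.foldl_nil]
      unfold pvRunC
      rw [pvCostB_cons_nil]
      rfl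
    | cons v ns' =>
      have hvU : v ∈ pvU grafo o := hns v List.mem_cons_self
      have hns' : ∀ w ∈ ns', w ∈ pvU grafo o := fun w hw => hns w (List.mem_cons_of_mem _ hw)
      have hInvFull : pvInv grafo o ((u, v :: ns') :: stack) := by
        intro fr hfr
        rcases List.mem_cons.mp hfr with hfr | hfr
        · subst hfr; exact hns
        · exact hInv fr hfr
      have hInv' : pvInv grafo o ((u, ns') :: stack) := pvInv_shrink grafo o u v ns' stack hInvFull
      by_cases hv : v ∈ vis
      · have hcv : PySem.Set.contains vis v = true := (PySem.Set.contains_iff vis v).mpr hv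
        have hstep : pvRunC grafo rel falt o ((u, v :: ns') :: stack) vis ps =
            pvRunC grafo rel falt o ((u, ns') :: stack) vis ps := by
          unfold pvRunC
          rw [pvCostB_cons_cons]
          simp only [runPasosB, hcv, if_true]
        rw [hstep]
        have hm' : (pvE grafo + 2) * pvNeed grafo o vis + pvSC ((u, ns') :: stack) ≤ n := by
          simp only [pvSC, List.map_cons, List.sum_cons, List.length_cons] at hm ⊢
          omega
        rw [ih f u ns' stack vis ps hm' hns' hInv hf]
        simp only [List.foldl_cons, pvBodyA, hcv, if_true]
      · have hcv : PySem.Set.contains vis v = false := by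
          cases h : PySem.Set.contains vis v with
          | false => rfl
          | true => exact absurd ((PySem.Set.contains_iff vis v).mp h) hv
        cases f with
        | zero =>
          exfalso
          have := pvNeed_pos grafo o v vis hvU hv
          omega
        | succ f' =>
          have hneed : pvNeed grafo o (PySem.Set.add vis v) + 1 ≤ pvNeed grafo o vis :=
            Nat.succ_le_of_lt (pvNeed_lt_add grafo o v vis hvU hv)
          have hmul := Nat.mul_le_mul_left (pvE grafo + 2) hneed
          have hexp : (pvE grafo + 2) * (pvNeed grafo o (PySem.Set.add vis v) + 1) =
              (pvE grafo + 2) * pvNeed grafo o (PySem.Set.add vis v) + pvE grafo + 2 := by ring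
          have hlen := pvLen_getNbrs_le grafo v
          have hstep : pvRunC grafo rel falt o ((u, v :: ns') :: stack) vis ps =
              pvRunC grafo rel falt o ((v, pvGetNbrs grafo v) :: (u, ns') :: stack)
                (PySem.Set.add vis v) (ps ++ [pvStep rel falt u v]) := by
            unfold pvRunC
            rw [pvCostB_cons_cons]
            simp only [runPasosB, hcv, Bool.false_eq_true, if_false]
            have hle := pvCostB_push_le grafo o u v ns' stack vis hvU hv
            rw [pvCostB_cons_cons] at hle
            exact pvRunB_suff grafo rel falt o _ _ _ _ _
              (pvInv_push grafo o u v ns' stack hInvFull) (by omega) le_rfl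
          rw [hstep]
          have hm1 : (pvE grafo + 2) * pvNeed grafo o (PySem.Set.add vis v) +
              pvSC ((v, pvGetNbrs grafo v) :: (u, ns') :: stack) ≤ n := by
            simp only [pvSC, List.map_cons, List.sum_cons, List.length_cons] at hm ⊢
            omega
          have hf1 : pvNeed grafo o (PySem.Set.add vis v) ≤ f' := by omega
          rw [ih f' v (pvGetNbrs grafo v) ((u, ns') :: stack) (PySem.Set.add vis v)
              (ps ++ [pvStep rel falt u v]) hm1 (fun w hw => pvMem_getNbrs_U grafo o v w hw) hInv' hf1]
          set st₁ := (pvGetNbrs grafo v).foldl (pvBodyA grafo rel falt f' v)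
              (PySem.Set.add vis v, ps ++ [pvStep rel falt u v]) with hst₁
          have hsub : ∀ x, x ∈ PySem.Set.add vis v → x ∈ st₁.1 := fun x hx =>
            pvFoldA_sub grafo rel falt f' v (pvGetNbrs grafo v) _ x hx
          have hneed₁ : pvNeed grafo o st₁.1 ≤ pvNeed grafo o (PySem.Set.add vis v) :=
            pvNeed_le_of_sub grafo o (PySem.Set.add vis v) st₁.1 hsub
          have hm2 : (pvE grafo + 2) * pvNeed grafo o st₁.1 + pvSC ((u, ns') :: stack) ≤ n := by
            have hmul₁ := Nat.mul_le_mul_left (pvE grafo + 2) hneed₁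
            simp only [pvSC, List.map_cons, List.sum_cons, List.length_cons] at hm ⊢
            omega
          have hf2 : pvNeed grafo o st₁.1 ≤ f' + 1 := by omega
          show pvRunC grafo rel falt o ((u, ns') :: stack) st₁.1 st₁.2 = _
          rw [ih (f' + 1) u ns' stack st₁.1 st₁.2 hm2 hns' hInv hf2]
          simp only [List.foldl_cons]
          have hinit : pvBodyA grafo rel falt (f' + 1) u (vis, ps) v = st₁ := by
            simp only [pvBodyA, hcv, Bool.false_eq_true, if_false]
            rw [pvDfsA_succ]
          rw [hinit]

-- ===== VERDICT (by name: the statement is the Claim_ definition above) =====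
theorem obtener_pasos_desde_spec : Claim_equal_obtener_pasos_desde := by
  intro oi g rel falt _ _
  show obtener_pasos_desde oi g rel falt = obtener_pasos_desde_alt oi g rel falt
  have hA : obtener_pasos_desde oi g rel falt =
      ((pvGetNbrs g oi).foldl (pvBodyA g rel falt (pvE g + 1) oi)
        (PySem.Set.add PySem.Set.empty oi, ([] : List String))).2 := rfl
  have hInv0 : pvInv g oi [(oi, pvGetNbrs g oi)] := by
    intro fr hfr
    rcases List.mem_cons.mp hfr with hfr | hfr
    · subst hfr; intro w hw; exact pvMem_getNbrs_U g oi oi w hw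
    · cases hfr
  have hneed0 := pvNeed_le_len g oi (PySem.Set.add PySem.Set.empty oi)
  have hlen0 := pvLen_getNbrs_le g oi
  have hcost : pvCostB g oi [(oi, pvGetNbrs g oi)] (PySem.Set.add PySem.Set.empty oi) ≤ pvFuelB g := by
    have hmul := Nat.mul_le_mul_left (pvE g + 2) hneed0
    have hexp : (pvE g + 2) * (pvE g + 1) + (pvE g + 2) = (pvE g + 2) * (pvE g + 2) := by ring
    have hfb : pvFuelB g = (pvE g + 2) * (pvE g + 2) := rfl
    simp only [pvCostB, pvSC, List.map_cons, List.map_nil, List.sum_cons, List.sum_nil]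
    omega
  have hB : obtener_pasos_desde_alt oi g rel falt =
      pvRunC g rel falt oi [(oi, pvGetNbrs g oi)] (PySem.Set.add PySem.Set.empty oi) [] := by
    show runPasosB g rel falt (pvFuelB g) [(oi, pvGetNbrs g oi)] (PySem.Set.add PySem.Set.empty oi) [] = _
    exact pvRunC_eq g rel falt oi (pvFuelB g) _ _ _ hInv0 hcost
  rw [hA, hB]
  rw [pvKey g rel falt oi
      ((pvE g + 2) * pvNeed g oi (PySem.Set.add PySem.Set.empty oi) + pvSC [(oi, pvGetNbrs g oi)])
      (pvE g + 1) oi (pvGetNbrs g oi) [] (PySem.Set.add PySem.Set.empty oi) [] le_rfl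
      (fun w hw => pvMem_getNbrs_U g oi oi w hw)
      (fun fr hfr => absurd hfr (List.not_mem_nil))
      hneed0]
  simp only [pvRunC, pvRunB_nil]
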